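-- pv_equiv track=rewrite | github.com/mkelleci63/Projets_RD | Pipeline_Analyse_Qualite/scripts/html_variant/generate_html_report.py | generate_table_from_lines
-- ===== SOURCE A (Python) =====
-- def html_escape(s: str) -> str:
--     """ Protège les caractères spéciaux pour éviter qu'ils ne soient interprétés comme des balises HTML. """
--     return (s.replace("&", "&amp;")
--              .replace("<", "&lt;")
--              .replace(">", "&gt;")
--              .replace('"', "&quot;"))
--
-- def remove_empty_columns_from_table(lines):
--     """ Supprime les colonnes vides du tableau (TSV). Retourne un header et les données filtrées. """
--     if not lines:
--         return [], []
--     header = [cell.strip() for cell in lines[0].split("\t")]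
--     data = []
--     for line in lines[1:]:
--         cells = [cell.strip() for cell in line.split("\t")]
--         if len(cells) < len(header):
--             cells.extend([""] * (len(header) - len(cells)))
--         data.append(cells)
--     keep = []
--     for i, h in enumerate(header):
--         if not (h == "" and all(row[i] == "" for row in data)):
--             keep.append(i)
--     new_header = [header[i] for i in keep]
--     new_data = [[row[i] for i in keep] for row in data]
--     return new_header, new_data
--
-- def generate_table_from_lines(lines):
--     """ Génère un tableau HTML simple à partir de lignes TSV. """
--     header, data = remove_empty_columns_from_table(lines)
--     html = "<table style='max-width:100%;'>\n<thead><tr>"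
--     for col in header:
--         html += f"<th>{html_escape(col)}</th>"
--     html += "</tr></thead>\n<tbody>\n"
--     for row in data:
--         html += "<tr>"
--         for cell in row:
--             html += f"<td>{html_escape(cell)}</td>"
--         html += "</tr>\n"
--     html += "</tbody></table>\n"
--     return html
-- ===== SOURCE B (Python) =====
-- def html_escape(s: str) -> str:
--     return (s.replace("&", "&amp;")
--              .replace("<", "&lt;")
--              .replace(">", "&gt;")
--              .replace('"', "&quot;"))
--
-- def generate_table_from_lines(lines):
--     """ Column-major variant: transpose, drop empty columns, transpose back. """
--     if lines:
--         header = [c.strip() for c in lines[0].split("\t")]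
--         n = len(header)
--         padded = [([c.strip() for c in l.split("\t")] + [""] * n)[:n] for l in lines[1:]]
--         cols = list(zip(*([header] + padded)))
--         keep = [c for c in cols if c[0] != "" or any(x != "" for x in c[1:])]
--         new_header = [c[0] for c in keep]
--         rows = list(zip(*keep))[1:] if keep else [()] * len(padded)
--     else:
--         new_header, rows = [], []
--     thead = "".join(f"<th>{html_escape(c)}</th>" for c in new_header)
--     tbody = "".join(
--         "<tr>" + "".join(f"<td>{html_escape(c)}</td>" for c in r) + "</tr>\n"
--         for r in rows)
--     return ("<table style='max-width:100%;'>\n<thead><tr>" + thead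
--             + "</tr></thead>\n<tbody>\n" + tbody + "</tbody></table>\n")
-- ===== Notes on version B (the rewrite author's own statement) =====
-- stated objective: alternative
-- what changed: B pads rows to the header width, transposes the table with zip(*...), filters out all-empty columns column-major, transposes back and emits the HTML via join, instead of A's index bookkeeping (keep-list of column indices plus nested row[i] projections) and string += accumulation.
import Mathlib
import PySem

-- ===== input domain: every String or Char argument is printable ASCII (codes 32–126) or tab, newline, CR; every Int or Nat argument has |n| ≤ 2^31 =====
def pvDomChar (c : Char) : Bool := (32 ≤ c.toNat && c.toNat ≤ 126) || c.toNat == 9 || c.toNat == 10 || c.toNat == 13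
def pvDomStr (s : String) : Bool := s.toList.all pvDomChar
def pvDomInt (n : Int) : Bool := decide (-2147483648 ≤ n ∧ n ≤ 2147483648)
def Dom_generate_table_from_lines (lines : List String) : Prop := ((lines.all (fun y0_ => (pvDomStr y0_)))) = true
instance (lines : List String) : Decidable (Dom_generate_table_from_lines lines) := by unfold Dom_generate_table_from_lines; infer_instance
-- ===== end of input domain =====

-- B rebuilds the table column-major (transpose, filter the columns, transpose back) instead of
-- A's index bookkeeping; same return value, objective: alternative (no speed claim).

-- ===== PORT A =====
-- html_escape (identical helper in both Python sources)
def htmlEscape (s : String) : String :=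
  PySem.Str.replace (PySem.Str.replace (PySem.Str.replace (PySem.Str.replace s "&" "&amp;") "<" "&lt;") ">" "&gt;") "\"" "&quot;"

-- [cell.strip() for cell in line.split("\t")]  (sep "\t" is non-empty, so split? never returns none)
def stripCells (line : String) : List String :=
  ((PySem.Str.split? line "\t").getD []).map PySem.Str.strip

-- remove_empty_columns_from_table
def removeEmptyColumnsFromTable (lines : List String) : List String × List (List String) :=
  match lines with
  | [] => ([], [])
  | first :: rest =>
    let header := stripCells first
    let data := rest.map (fun line =>
      let cells := stripCells line
      if cells.length < header.length then cells ++ List.replicate (header.length - cells.length) "" else cells)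
    let keep := (PySem.List.enumerate header).foldl
      (fun acc p =>
        if !(p.2 == "" && data.all (fun row => PySem.List.pyGetD row p.1 "" == "")) then acc ++ [p.1] else acc)
      ([] : List Int)
    let newHeader := keep.map (fun i => PySem.List.pyGetD header i "")
    let newData := data.map (fun row => keep.map (fun i => PySem.List.pyGetD row i ""))
    (newHeader, newData)

def generate_table_from_lines (lines : List String) : String :=
  let hd := removeEmptyColumnsFromTable lines
  let html := hd.1.foldl (fun h col => h ++ ("<th>" ++ htmlEscape col ++ "</th>"))
    "<table style='max-width:100%;'>\n<thead><tr>"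
  let html := html ++ "</tr></thead>\n<tbody>\n"
  let html := hd.2.foldl
    (fun h row => (row.foldl (fun h2 cell => h2 ++ ("<td>" ++ htmlEscape cell ++ "</td>")) (h ++ "<tr>")) ++ "</tr>\n")
    html
  html ++ "</tbody></table>\n"

-- ===== PORT B =====
-- "".join(parts)
def strJoin (parts : List String) : String := parts.foldl (· ++ ·) ""

-- zip(*ls): truncating transpose, as Python's zip
def zipStar : List (List String) → List (List String)
  | [] => []
  | l :: ls =>
    if (l :: ls).any List.isEmpty then []
    else (l.headD "" :: ls.map (fun x => x.headD "")) :: zipStar (l.tail :: ls.map List.tail)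
  termination_by ls => (ls.headD []).length
  decreasing_by
    simp only [List.headD_cons, List.any_cons, Bool.or_eq_true] at *
    cases l with
    | nil => simp at *
    | cons a t => simp

-- column-major core of B: pad, transpose, keep non-empty columns, transpose back
def tableColumnsB (lines : List String) : List String × List (List String) :=
  match lines with
  | [] => ([], [])
  | first :: rest =>
    let header := stripCells first
    let n := header.length
    let padded := rest.map (fun l => (stripCells l ++ List.replicate n "").take n)
    let cols := zipStar (header :: padded)
    let keep := cols.filter (fun c => c.headD "" != "" || c.tail.any (fun x => x != ""))
    let newHeader := keep.map (fun c => c.headD "")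
    let rows := if keep.isEmpty then padded.map (fun _ => ([] : List String)) else (zipStar keep).tail
    (newHeader, rows)

def generate_table_from_lines_alt (lines : List String) : String :=
  let hr := tableColumnsB lines
  let thead := strJoin (hr.1.map (fun c => "<th>" ++ htmlEscape c ++ "</th>"))
  let tbody := strJoin (hr.2.map (fun r =>
    "<tr>" ++ strJoin (r.map (fun c => "<td>" ++ htmlEscape c ++ "</td>")) ++ "</tr>\n"))
  "<table style='max-width:100%;'>\n<thead><tr>" ++ thead ++ "</tr></thead>\n<tbody>\n" ++ tbody
    ++ "</tbody></table>\n"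

-- ===== PRECONDITION & SPEC =====
def Spec_generate_table_from_lines (lines : List String) (out : String) : Prop := out = generate_table_from_lines_alt lines
instance (lines : List String) (out : String) : Decidable (Spec_generate_table_from_lines lines out) := by unfold Spec_generate_table_from_lines; infer_instance

-- ===== CLAIM (what is proved, stated in full; the proofs are below) =====
def Claim_equal_generate_table_from_lines : Prop := ∀ (lines : List String), Dom_generate_table_from_lines lines → Spec_generate_table_from_lines lines (generate_table_from_lines lines)

-- ===== LEMMAS AND PROOFS =====

-- B's truncating pad is A's extending pad cut to the header width
theorem padB_eq_take_padA (n : Nat) (cells : List String) :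
    (cells ++ List.replicate n "").take n
      = (if cells.length < n then cells ++ List.replicate (n - cells.length) "" else cells).take n := by
  split
  · next h =>
    rw [List.take_append, List.take_append]
    simp only [List.take_replicate]
    congr 2
    omega
  · next h =>
    rw [List.take_append]
    have h0 : n - cells.length = 0 := by omega
    simp [h0]

theorem padA_len (n : Nat) (cells : List String) :
    n ≤ (if cells.length < n then cells ++ List.replicate (n - cells.length) "" else cells).length := by
  split
  · next h => simp; omega
  · next h => omega

theorem getD_zero_headD (l : List String) (d : String) (h : l ≠ []) : l.getD 0 d = l.headD d := by
  cases l with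
  | nil => exact absurd rfl h
  | cons x xs => simp

theorem getD_succ_tail (l : List String) (i : Nat) (d : String) (h : l ≠ []) :
    l.getD (i + 1) d = l.tail.getD i d := by
  cases l with
  | nil => exact absurd rfl h
  | cons x xs => simp

-- zipStar on a non-empty family of equal-length lists is the column map
theorem zipStar_eq (n : Nat) (ls : List (List String)) (hne : ls ≠ [])
    (hlen : ∀ l ∈ ls, l.length = n) :
    zipStar ls = (List.range n).map (fun i => ls.map (fun l => l.getD i "")) := by
  induction n generalizing ls with
  | zero =>
    cases ls with
    | nil => exact absurd rfl hne
    | cons a t =>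
      have ha : a = [] := List.eq_nil_of_length_eq_zero (hlen a (by simp))
      rw [zipStar]
      simp [ha]
  | succ n ih =>
    cases ls with
    | nil => exact absurd rfl hne
    | cons a t =>
      have hne0 : ∀ l ∈ a :: t, l ≠ [] := by
        intro l hl h
        have := hlen l hl
        rw [h] at this
        simp at this
      have hcond : (a :: t).any List.isEmpty = false := by
        simp only [List.any_eq_false]
        intro l hl
        simpa [List.isEmpty_iff] using hne0 l hl
      rw [zipStar, hcond]
      simp only [Bool.false_eq_true, if_false]
      rw [ih (a.tail :: t.map List.tail) (by simp)
        (by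
          intro l hl
          simp only [List.mem_cons, List.mem_map] at hl
          rcases hl with h | ⟨x, hx, h⟩
          · subst h; have := hlen a (by simp); simp [List.length_tail, this]
          · subst h; have := hlen x (List.mem_cons_of_mem _ hx); simp [List.length_tail, this])]
      rw [List.range_succ_eq_map, List.map_cons, List.map_map]
      congr 1
      · -- the head row
        rw [List.map_cons]
        congr 1
        · rw [getD_zero_headD a "" (hne0 a (by simp))]
        · apply List.map_congr_left
          intro l hl
          rw [getD_zero_headD l "" (hne0 l (List.mem_cons_of_mem _ hl))]
      · -- the remaining rows
        apply List.map_congr_left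
        intro i _
        simp only [Function.comp_apply, List.map_cons, List.map_map]
        congr 1
        · rw [getD_succ_tail a i "" (hne0 a (by simp))]
        · apply List.map_congr_left
          intro l hl
          simp only [Function.comp_apply]
          rw [getD_succ_tail l i "" (hne0 l (List.mem_cons_of_mem _ hl))]

theorem getD_take_lt (l : List String) (n i : Nat) (h : i < n) (d : String) :
    (l.take n).getD i d = l.getD i d := by
  simp [List.getD, h]

-- A's enumerate/append loop builds exactly the filtered index range (as Ints)
theorem keepA_eq_K (H : List String) (D : List (List String)) :
    (PySem.List.enumerate H).foldl
      (fun acc p =>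
        if !(p.2 == "" && D.all (fun row => PySem.List.pyGetD row p.1 "" == "")) then acc ++ [p.1] else acc)
      ([] : List Int)
    = ((List.range H.length).filter
        (fun i => !(H.getD i "" == "" && D.all (fun row => row.getD i "" == "")))).map
        (Nat.cast : Nat → Int) := by
  rw [PySem.List.foldl_append_if
        (fun p : Int × String => !(p.2 == "" && D.all (fun row => PySem.List.pyGetD row p.1 "" == "")))
        Prod.fst]
  rw [PySem.List.enumerate_eq_map_pyRange H ""]
  have hlen' : PySem.List.len H = (H.length : Int) := by simp [PySem.List.len]
  rw [hlen', PySem.List.pyRange_zero_natCast, List.filter_map, List.filter_map,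
      List.map_map, List.map_map, List.nil_append]
  have hfil : (List.range H.length).filter
      (((fun p : Int × String => !(p.2 == "" && D.all (fun row => PySem.List.pyGetD row p.1 "" == ""))) ∘
          (fun j : Int => (j, PySem.List.pyGetD H j ""))) ∘ (fun k : Nat => (k : Int)))
      = (List.range H.length).filter
          (fun i => !(H.getD i "" == "" && D.all (fun row => row.getD i "" == ""))) := by
    apply List.filter_congr
    intro k hk
    simp [Function.comp_apply]
  rw [hfil]
  apply List.map_congr_left
  intro k hk
  rfl

-- transposing the kept columns back yields A's row projection
theorem rows_eq (H : List String) (D : List (List String)) (K : List Nat) (n : Nat)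
    (hKlt : ∀ i ∈ K, i < n) :
    (List.range (D.map (List.take n)).length).map (fun j =>
        (K.map (fun i => H.getD i "" :: (D.map (List.take n)).map (fun l => l.getD i ""))).map
          (fun c => c.getD (j + 1) ""))
    = D.map (fun row => K.map (fun i => row.getD i "")) := by
  apply List.ext_getElem (by simp)
  intro j h1 h2
  simp only [List.getElem_map, List.getElem_range, List.map_map]
  apply List.map_congr_left
  intro i hi
  simp only [Function.comp_apply, List.getD_cons_succ]
  have hj : j < D.length := by simpa using h2
  rw [List.getD_eq_getElem _ "" (by simpa using hj), List.getElem_map]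
  simp only [Function.comp_apply]
  exact getD_take_lt _ n i (hKlt i hi) ""

theorem pair_eq (lines : List String) :
    removeEmptyColumnsFromTable lines = tableColumnsB lines := by
  cases lines with
  | nil => rfl
  | cons first rest =>
    simp only [removeEmptyColumnsFromTable, tableColumnsB]
    set H := stripCells first with hH
    set n := H.length with hn
    set D := rest.map (fun line =>
      if (stripCells line).length < n then
        stripCells line ++ List.replicate (n - (stripCells line).length) ""
      else stripCells line) with hD
    set P := rest.map (fun l => (stripCells l ++ List.replicate n "").take n) with hP
    set K := (List.range n).filter
      (fun i => !(H.getD i "" == "" && D.all (fun row => row.getD i "" == ""))) with hK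
    have hPD : P = D.map (List.take n) := by
      rw [hP, hD, List.map_map]
      apply List.map_congr_left
      intro l _
      simp only [Function.comp_apply]
      exact padB_eq_take_padA n (stripCells l)
    have hDlen : ∀ row ∈ D, n ≤ row.length := by
      rw [hD]
      intro row hr
      simp only [List.mem_map] at hr
      obtain ⟨l, _, rfl⟩ := hr
      exact padA_len n (stripCells l)
    have hPlen : ∀ r ∈ H :: P, r.length = n := by
      intro r hr
      rcases List.mem_cons.mp hr with h | h
      · rw [h, hn]
      · rw [hPD] at h
        simp only [List.mem_map] at h
        obtain ⟨row, hrow, rfl⟩ := h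
        simp [List.length_take]
        exact hDlen row hrow
    have hKlt : ∀ i ∈ K, i < n := by
      intro i hi
      rw [hK] at hi
      exact List.mem_range.mp (List.mem_of_mem_filter hi)
    have hkeepA : (PySem.List.enumerate H).foldl
        (fun acc p =>
          if !(p.2 == "" && D.all (fun row => PySem.List.pyGetD row p.1 "" == "")) then acc ++ [p.1] else acc)
        ([] : List Int) = K.map (Nat.cast : Nat → Int) := by
      rw [keepA_eq_K H D, hK, hn]
    have hcols : zipStar (H :: P)
        = (List.range n).map (fun i => (H :: P).map (fun l => l.getD i "")) :=
      zipStar_eq n (H :: P) (by simp) hPlen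
    have hkeepB : (zipStar (H :: P)).filter (fun c => c.headD "" != "" || c.tail.any (fun x => x != ""))
        = K.map (fun i => H.getD i "" :: P.map (fun l => l.getD i "")) := by
      rw [hcols, List.filter_map]
      have hfil : (List.range n).filter
          ((fun c => c.headD "" != "" || c.tail.any (fun x => x != "")) ∘
            (fun i => (H :: P).map (fun l => l.getD i "")))
          = (List.range n).filter
            (fun i => !(H.getD i "" == "" && D.all (fun row => row.getD i "" == ""))) := by
        apply List.filter_congr
        intro i hi
        have hilt : i < n := List.mem_range.mp hi
        simp only [Function.comp_apply, List.map_cons, List.headD_cons, List.tail_cons, List.any_map]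
        rw [hPD, List.any_map]
        have hany : D.any ((fun x => x != "") ∘ ((fun l => l.getD i "") ∘ List.take n))
            = D.any (fun row => !(row.getD i "" == "")) := by
          exact List.any_congr rfl fun row => by
            simp only [Function.comp_apply, bne]
            rw [getD_take_lt row n i hilt]
        rw [show ((fun x => x != "") ∘ (fun l => l.getD i "")) ∘ List.take n
              = (fun x => x != "") ∘ ((fun l => l.getD i "") ∘ List.take n) from rfl, hany,
            Bool.not_and, List.not_all_eq_any_not]
        simp [bne]
      rw [hfil, ← hK]
      apply List.map_congr_left
      intro i _
      rfl
    rw [hkeepA, hkeepB]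
    refine Prod.ext ?_ ?_
    · -- headers
      show (K.map (Nat.cast : Nat → Int)).map (fun i => PySem.List.pyGetD H i "")
          = (K.map (fun i => H.getD i "" :: P.map (fun l => l.getD i ""))).map (fun c => c.headD "")
      rw [List.map_map, List.map_map]
      apply List.map_congr_left
      intro i _
      simp [Function.comp_apply]
    · -- data rows
      show D.map (fun row => (K.map (Nat.cast : Nat → Int)).map (fun i => PySem.List.pyGetD row i ""))
          = if (K.map (fun i => H.getD i "" :: P.map (fun l => l.getD i ""))).isEmpty then
              P.map (fun _ => ([] : List String))
            else (zipStar (K.map (fun i => H.getD i "" :: P.map (fun l => l.getD i "")))).tail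
      by_cases hKnil : K = []
      · rw [hKnil]
        simp only [List.map_nil, List.isEmpty_nil, if_true]
        have hlen : P.length = D.length := by rw [hPD]; simp
        rw [List.map_const', List.map_const', hlen]
      · have hne : K.map (fun i => H.getD i "" :: P.map (fun l => l.getD i "")) ≠ [] := by
          simpa using hKnil
        rw [if_neg (by simpa [List.isEmpty_iff] using hne)]
        rw [zipStar_eq (P.length + 1) _ hne
          (by
            intro c hc
            simp only [List.mem_map] at hc
            obtain ⟨i, _, rfl⟩ := hc
            simp)]
        rw [List.range_succ_eq_map, List.map_cons, List.tail_cons]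
        have hA : D.map (fun row => (K.map (Nat.cast : Nat → Int)).map (fun i => PySem.List.pyGetD row i ""))
            = D.map (fun row => K.map (fun i => row.getD i "")) := by
          apply List.map_congr_left
          intro row _
          rw [List.map_map]
          apply List.map_congr_left
          intro i _
          simp [Function.comp_apply]
        have hB : (((List.range P.length).map Nat.succ).map (fun j =>
              (K.map (fun i => H.getD i "" :: P.map (fun l => l.getD i ""))).map (fun c => c.getD j "")))
            = (List.range P.length).map (fun j =>
              (K.map (fun i => H.getD i "" :: P.map (fun l => l.getD i ""))).map (fun c => c.getD (j + 1) "")) := by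
          rw [List.map_map]
          apply List.map_congr_left
          intro j _
          rfl
        rw [hA, hB, hPD]
        exact (rows_eq H D K n hKlt).symm

theorem foldl_append_str (xs : List String) (a : String) :
    xs.foldl (· ++ ·) a = a ++ strJoin xs := by
  induction xs generalizing a with
  | nil => simp [strJoin]
  | cons x xs ih =>
    show xs.foldl (· ++ ·) (a ++ x) = a ++ strJoin (x :: xs)
    rw [ih]
    have : strJoin (x :: xs) = x ++ strJoin xs := by
      show xs.foldl (· ++ ·) ("" ++ x) = _
      rw [ih]
      simp
    rw [this, String.append_assoc]

theorem strJoin_cons (x : String) (xs : List String) :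
    strJoin (x :: xs) = x ++ strJoin xs := by
  show xs.foldl (· ++ ·) ("" ++ x) = _
  rw [foldl_append_str]
  simp

theorem foldl_absorb {α : Type} (f : α → String) (l : List α) (a : String) :
    l.foldl (fun h c => h ++ f c) a = a ++ strJoin (l.map f) := by
  induction l generalizing a with
  | nil => simp [strJoin]
  | cons x xs ih =>
    rw [List.foldl_cons, ih, List.map_cons, strJoin_cons, String.append_assoc]

theorem foldl_rows (d : List (List String)) (a : String) :
    d.foldl
      (fun h row => (row.foldl (fun h2 cell => h2 ++ ("<td>" ++ htmlEscape cell ++ "</td>")) (h ++ "<tr>")) ++ "</tr>\n")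
      a
    = a ++ strJoin (d.map (fun r =>
        "<tr>" ++ strJoin (r.map (fun c => "<td>" ++ htmlEscape c ++ "</td>")) ++ "</tr>\n")) := by
  induction d generalizing a with
  | nil => simp [strJoin]
  | cons r rs ih =>
    rw [List.foldl_cons, ih, List.map_cons, strJoin_cons, foldl_absorb]
    simp [String.append_assoc]

-- ===== VERDICT (by name: the statement is the Claim_ definition above) =====
theorem generate_table_from_lines_spec : Claim_equal_generate_table_from_lines := by
  intro lines _
  show _ = _
  simp only [generate_table_from_lines, generate_table_from_lines_alt, pair_eq]
  rw [foldl_absorb, foldl_rows]
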